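-- pv_equiv track=rewrite | github.com/YoadPilosof/AnyDice | dice_utilities.py | generate_all_ordered_lists
-- ===== SOURCE A (Python) =====
-- def generate_all_ordered_lists(values_list, N, reverse=False):
--     """
--     Generates a list containing all combinations of values from values_list that are sorted
--     :param values_list: A sorted list describing the values of each element
--     :param N: Length of the list
--     :param reverse: Specifies if to sort the list in ascending or descending order
--     :return: A list of lists
--     """
--
--     # Recursion stop case. For N = 1 (one die), the list of combinations is a list of all possible values
--     if N == 1:
--         # We wrap each element in a list, because we expect the function to return a list of lists
--         return [[value] for value in values_list]
--
--     new_combs = []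
--     # Recursively call the function with length-1
--     old_combs = generate_all_ordered_lists(values_list, N - 1, reverse)
--     # Loop over all combinations of the first N-1 dice
--     for comb in old_combs:
--         # Loop over all values of the Nth die
--         for value in values_list:
--             # Only add a valid combination if the combination is sorted (ascending or descending according to <reverse>)
--             if (value >= comb[-1] and not reverse) or (value <= comb[-1] and reverse):
--                 new_combs.append(comb + [value])
--     return new_combs
-- ===== SOURCE B (Python) =====
-- def generate_all_ordered_lists(values_list, N, reverse=False):
--     # Iterative: precompute, once per distinct value, the list of values allowed
--     # to follow it, then extend all combinations level by level.
--     succ = {}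
--     for v in values_list:
--         if v not in succ:
--             succ[v] = [u for u in values_list if (u <= v if reverse else u >= v)]
--     combs = [[v] for v in values_list]
--     for _ in range(N - 1):
--         combs = [c + [u] for c in combs for u in succ[c[-1]]]
--     return combs
-- ===== Notes on version B (the rewrite author's own statement) =====
-- stated objective: alternative
-- what changed: Replaced A's recursion on N with an inner scan-and-test over all values by an iterative level-by-level build that precomputes once, per distinct value, the list of admissible successor values and extends each combination directly with that list.
import Mathlib
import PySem

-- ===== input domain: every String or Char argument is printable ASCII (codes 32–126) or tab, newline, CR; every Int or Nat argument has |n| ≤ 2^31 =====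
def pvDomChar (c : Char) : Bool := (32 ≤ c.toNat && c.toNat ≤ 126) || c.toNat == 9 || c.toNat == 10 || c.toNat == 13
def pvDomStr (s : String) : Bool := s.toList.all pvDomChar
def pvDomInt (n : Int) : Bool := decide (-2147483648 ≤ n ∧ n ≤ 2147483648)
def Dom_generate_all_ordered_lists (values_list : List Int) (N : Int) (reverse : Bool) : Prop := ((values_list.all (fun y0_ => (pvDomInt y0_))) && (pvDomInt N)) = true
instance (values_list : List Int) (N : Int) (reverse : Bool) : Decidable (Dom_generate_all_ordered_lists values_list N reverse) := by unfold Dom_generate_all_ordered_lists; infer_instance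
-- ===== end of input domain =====

-- B replaces A's recursion-with-inner-scan by an iterative level-by-level build that
-- precomputes, once per distinct value, the list of admissible successor values (alternative decomposition).


-- ===== PORT A =====
-- A's recursion on N, fuel = N.toNat (Python diverges for N ≤ 0; those inputs are outside Pre_).
def genAAux (values_list : List Int) (reverse : Bool) : Nat → List (List Int)
  | 0 => []
  | 1 => values_list.map (fun value => [value])
  | n + 2 =>
    let old_combs := genAAux values_list reverse (n + 1)
    old_combs.foldl (fun new_combs comb =>
      values_list.foldl (fun acc value =>
        match PySem.List.pyGet? comb (-1) with
        | some last =>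
          if (last ≤ value ∧ reverse = false) ∨ (value ≤ last ∧ reverse = true)
          then acc ++ [comb ++ [value]] else acc
        | none => acc) new_combs) []

def generate_all_ordered_lists (values_list : List Int) (N : Int) (reverse : Bool) : List (List Int) :=
  genAAux values_list reverse N.toNat

-- ===== PORT B =====
def generate_all_ordered_lists_alt (values_list : List Int) (N : Int) (reverse : Bool) : List (List Int) :=
  let succ : PySem.Dict Int (List Int) :=
    values_list.foldl (fun d v =>
      if d.contains v then d
      else d.insert v (values_list.filter (fun u => if reverse then decide (u ≤ v) else decide (v ≤ u))))
      PySem.Dict.empty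
  let combs := values_list.map (fun v => [v])
  (PySem.List.pyRange 0 (N - 1) 1).foldl (fun cs _ =>
    cs.flatMap (fun c =>
      match PySem.List.pyGet? c (-1) with
      | some last => (succ.getD last []).map (fun u => c ++ [u])
      | none => [])) combs

-- ===== PRECONDITION & SPEC =====
-- Pre_: Python A recurses on N-1 without a floor, so it diverges (RecursionError) for N ≤ 0.
def Pre_generate_all_ordered_lists (values_list : List Int) (N : Int) (reverse : Bool) : Prop := 1 ≤ N
instance (values_list : List Int) (N : Int) (reverse : Bool) : Decidable (Pre_generate_all_ordered_lists values_list N reverse) := by unfold Pre_generate_all_ordered_lists; infer_instance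
def pvWitness_generate_all_ordered_lists : List Int × Int × Bool := ([1, 2, 3], 2, false)

def Spec_generate_all_ordered_lists (values_list : List Int) (N : Int) (reverse : Bool) (out : List (List Int)) : Prop := out = generate_all_ordered_lists_alt values_list N reverse
instance (values_list : List Int) (N : Int) (reverse : Bool) (out : List (List Int)) : Decidable (Spec_generate_all_ordered_lists values_list N reverse out) := by unfold Spec_generate_all_ordered_lists; infer_instance

-- ===== CLAIM (what is proved, stated in full; the proofs are below) =====
def Claim_equal_generate_all_ordered_lists : Prop := ∀ (values_list : List Int) (N : Int) (reverse : Bool), Dom_generate_all_ordered_lists values_list N reverse → Pre_generate_all_ordered_lists values_list N reverse → Spec_generate_all_ordered_lists values_list N reverse (generate_all_ordered_lists values_list N reverse)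

-- ===== LEMMAS AND PROOFS =====

-- The successor-list function B's dict memoizes.
def succFn (values_list : List Int) (reverse : Bool) (v : Int) : List Int :=
  values_list.filter (fun u => if reverse then decide (u ≤ v) else decide (v ≤ u))

-- B's dict after the build loop maps every key of values_list to succFn of that key.
theorem succ_dict_sound (values_list l : List Int) (reverse : Bool)
    (d0 : PySem.Dict Int (List Int))
    (h0 : ∀ k, d0.get? k = none ∨ d0.get? k = some (succFn values_list reverse k)) :
    ∀ v, (v ∈ l ∨ d0.get? v = some (succFn values_list reverse v)) →
      (l.foldl (fun d v' =>
        if d.contains v' then d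
        else d.insert v' (values_list.filter (fun u => if reverse then decide (u ≤ v') else decide (v' ≤ u))))
        d0).get? v = some (succFn values_list reverse v) := by
  induction l generalizing d0 with
  | nil =>
    intro v hv
    rcases hv with hv | hv
    · exact absurd hv (List.not_mem_nil)
    · simpa using hv
  | cons a t ih =>
    intro v hv
    simp only [List.foldl_cons]
    apply ih
    · intro k
      by_cases hc : d0.contains a = true
      · simp only [hc, if_true]; exact h0 k
      · simp only [hc, Bool.false_eq_true, if_false]
        by_cases hk : k = a
        · subst hk; right; exact PySem.Dict.get?_insert_self d0 k _
        · rw [PySem.Dict.get?_insert_of_ne d0 _ hk]; exact h0 k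
    · rcases hv with hv | hv
      · rcases List.mem_cons.mp hv with rfl | hvt
        · right
          by_cases hc : d0.contains v = true
          · rcases h0 v with hn | hs
            · rw [PySem.Dict.get?_eq_none_iff_contains] at hn; simp [hn] at hc
            · simpa [hc] using hs
          · simp only [hc, Bool.false_eq_true, if_false]
            exact PySem.Dict.get?_insert_self d0 v _
        · exact Or.inl hvt
      · right
        by_cases hc : d0.contains a = true
        · simpa [hc] using hv
        · by_cases hk : v = a
          · subst hk
            simp only [hc, Bool.false_eq_true, if_false]
            exact PySem.Dict.get?_insert_self d0 v _
          · simp only [hc, Bool.false_eq_true, if_false]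
            rw [PySem.Dict.get?_insert_of_ne d0 _ hk]; exact hv

-- Invariant of A's level lists: each combination is nonempty and ends in a value of values_list.
def LevelInv (values_list : List Int) (L : List (List Int)) : Prop :=
  ∀ c ∈ L, ∃ last, PySem.List.pyGet? c (-1) = some last ∧ last ∈ values_list

theorem genAAux_spec (values_list : List Int) (reverse : Bool)
    (succ : PySem.Dict Int (List Int))
    (hsucc : ∀ v ∈ values_list, succ.get? v = some (succFn values_list reverse v)) :
    ∀ n : Nat,
      LevelInv values_list (genAAux values_list reverse (n + 1)) ∧
      genAAux values_list reverse (n + 1) =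
        (List.range n).foldl (fun cs _ =>
          cs.flatMap (fun c =>
            match PySem.List.pyGet? c (-1) with
            | some last => (succ.getD last []).map (fun u => c ++ [u])
            | none => [])) (values_list.map (fun v => [v])) := by
  intro n
  induction n with
  | zero =>
    constructor
    · intro c hc
      simp only [genAAux] at hc
      rcases List.mem_map.mp hc with ⟨v, hv, rfl⟩
      exact ⟨v, by simp [PySem.List.pyGet?_neg_one], hv⟩
    · simp [genAAux]
  | succ n ih =>
    obtain ⟨hInv, heq⟩ := ih
    have hstep : genAAux values_list reverse (n + 2) =
        (genAAux values_list reverse (n + 1)).flatMap (fun c =>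
          match PySem.List.pyGet? c (-1) with
          | some last => (succ.getD last []).map (fun u => c ++ [u])
          | none => []) := by
      show (genAAux values_list reverse (n + 1)).foldl _ [] = _
      have hbody : ∀ (acc : List (List Int)), ∀ c ∈ genAAux values_list reverse (n + 1),
          (values_list.foldl (fun acc2 value =>
            match PySem.List.pyGet? c (-1) with
            | some last =>
              if (last ≤ value ∧ reverse = false) ∨ (value ≤ last ∧ reverse = true)
              then acc2 ++ [c ++ [value]] else acc2
            | none => acc2) acc) =
          acc ++ (match PySem.List.pyGet? c (-1) with
            | some last => (succ.getD last []).map (fun u => c ++ [u])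
            | none => []) := by
        intro acc c hc
        obtain ⟨last, hlast, hmem⟩ := hInv c hc
        rw [hlast]
        simp only
        rw [PySem.List.foldl_append_ite
          (p := fun value => (last ≤ value ∧ reverse = false) ∨ (value ≤ last ∧ reverse = true))
          (f := fun value => c ++ [value])]
        congr 1
        simp only [PySem.Dict.getD, hsucc last hmem, Option.getD_some, succFn]
        congr 1
        refine List.filter_congr ?_
        intro u _
        cases reverse <;> simp
      calc (genAAux values_list reverse (n + 1)).foldl (fun new_combs comb =>
              values_list.foldl (fun acc value =>
                match PySem.List.pyGet? comb (-1) with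
                | some last =>
                  if (last ≤ value ∧ reverse = false) ∨ (value ≤ last ∧ reverse = true)
                  then acc ++ [comb ++ [value]] else acc
                | none => acc) new_combs) []
          = (genAAux values_list reverse (n + 1)).foldl (fun new_combs comb =>
              new_combs ++ (match PySem.List.pyGet? comb (-1) with
                | some last => (succ.getD last []).map (fun u => comb ++ [u])
                | none => [])) [] := by
              exact PySem.List.foldl_congr_mem _ _ _ _ hbody
        _ = _ := by
              rw [PySem.List.foldl_append_eq_flatMap]
              simp
    constructor
    · intro c hc
      rw [hstep] at hc
      rcases List.mem_flatMap.mp hc with ⟨c0, hc0, hcm⟩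
      obtain ⟨last, hlast, hmem⟩ := hInv c0 hc0
      rw [hlast] at hcm
      simp only at hcm
      rcases List.mem_map.mp hcm with ⟨u, hu, rfl⟩
      refine ⟨u, PySem.List.pyGet?_neg_one_append_singleton c0 u, ?_⟩
      rw [PySem.Dict.getD, hsucc last hmem] at hu
      simp only [Option.getD_some, succFn] at hu
      exact List.mem_of_mem_filter hu
    · rw [hstep, heq, List.range_succ, List.foldl_append]
      simp

-- ===== VERDICT (by name: the statement is the Claim_ definition above) =====
theorem generate_all_ordered_lists_spec : Claim_equal_generate_all_ordered_lists := by
  intro values_list N reverse _ hpre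
  have hpre' : (1 : Int) ≤ N := hpre
  unfold Spec_generate_all_ordered_lists
  set succ : PySem.Dict Int (List Int) :=
    values_list.foldl (fun d v =>
      if d.contains v then d
      else d.insert v (values_list.filter (fun u => if reverse then decide (u ≤ v) else decide (v ≤ u))))
      PySem.Dict.empty with hsuccdef
  have hsucc : ∀ v ∈ values_list, succ.get? v = some (succFn values_list reverse v) := by
    intro v hv
    exact succ_dict_sound values_list values_list reverse PySem.Dict.empty
      (by intro k; left; rfl) v (Or.inl hv)
  obtain ⟨n, hn⟩ : ∃ n : Nat, N.toNat = n + 1 := ⟨(N - 1).toNat, by omega⟩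
  have hBrfl : generate_all_ordered_lists_alt values_list N reverse =
      (PySem.List.pyRange 0 (N - 1) 1).foldl (fun cs _ =>
        cs.flatMap (fun c =>
          match PySem.List.pyGet? c (-1) with
          | some last => (succ.getD last []).map (fun u => c ++ [u])
          | none => [])) (values_list.map (fun v => [v])) := rfl
  have hrange : PySem.List.pyRange 0 (N - 1) 1 = (List.range n).map (fun (k : Nat) => (0 : Int) + (k : Int)) := by
    have hto : (N - 1 - 0).toNat = n := by omega
    rw [PySem.List.pyRange_one, hto]
  show generate_all_ordered_lists values_list N reverse = _
  rw [hBrfl, hrange, List.foldl_map]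
  unfold generate_all_ordered_lists
  rw [hn, (genAAux_spec values_list reverse succ hsucc n).2]
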